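-- pv_equiv track=rewrite | github.com/mihaicrisan04/comp-programming | AdventOfCode/2025/day01/1.py | compute_password
-- ===== SOURCE A (Python) =====
-- def compute_password(moves: list[tuple[str, int]]) -> int:
--     pos = 50  # starting position
--     zeros = 0
--     for dir_char, dist in moves:
--         if dir_char == "L":
--             pos = (pos - dist) % 100
--         else:  # "R"
--             pos = (pos + dist) % 100
--         if pos == 0:
--             zeros += 1
--     return zeros
-- ===== SOURCE B (Python) =====
-- def compute_password(moves):
--     deltas = [-d if c == "L" else d for c, d in moves]
--     sums = []
--     total = 0
--     for d in deltas:
--         total += d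
--         sums.append(total)
--     return sum(1 for s in sums if (50 + s) % 100 == 0)
-- ===== Notes on version B (the rewrite author's own statement) =====
-- stated objective: alternative
-- what changed: Replaces the fused loop that keeps a mod-100 position and counts zeros on the fly by a three-stage pipeline: map moves to signed deltas, build the prefix-sum table, then count entries s with (50+s) % 100 == 0 (per-step modulo dropped).
import Mathlib
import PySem

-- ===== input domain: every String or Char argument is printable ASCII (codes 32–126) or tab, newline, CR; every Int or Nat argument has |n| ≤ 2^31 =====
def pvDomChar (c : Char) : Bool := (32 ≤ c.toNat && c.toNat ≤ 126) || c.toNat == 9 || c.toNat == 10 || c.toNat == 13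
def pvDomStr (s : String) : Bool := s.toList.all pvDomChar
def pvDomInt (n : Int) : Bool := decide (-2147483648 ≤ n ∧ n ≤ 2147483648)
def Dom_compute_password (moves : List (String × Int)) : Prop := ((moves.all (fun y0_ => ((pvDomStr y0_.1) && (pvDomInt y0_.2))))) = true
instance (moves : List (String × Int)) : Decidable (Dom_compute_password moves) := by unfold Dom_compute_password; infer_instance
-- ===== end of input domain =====

-- B replaces A's fused mod-100 position loop by a pipeline: signed deltas, prefix-sum table, count of
-- sums s with (50+s) % 100 == 0 (alternative decomposition, same O(n) cost).

-- ===== PORT A =====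
def compute_password (moves : List (String × Int)) : Int :=
  (moves.foldl (fun (st : Int × Int) m =>
      let pos := if m.1 == "L" then PySem.Int.mod (st.1 - m.2) 100
                 else PySem.Int.mod (st.1 + m.2) 100
      (pos, if pos == 0 then st.2 + 1 else st.2))
    ((50 : Int), (0 : Int))).2

-- ===== PORT B =====
def compute_password_alt (moves : List (String × Int)) : Int :=
  let deltas := moves.map (fun m => if m.1 == "L" then -m.2 else m.2)
  let sums := (deltas.foldl (fun (st : Int × List Int) d => (st.1 + d, st.2 ++ [st.1 + d]))
                ((0 : Int), ([] : List Int))).2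
  ((sums.countP (fun s => PySem.Int.mod (50 + s) 100 == 0) : Nat) : Int)

-- ===== PRECONDITION & SPEC =====
def Spec_compute_password (moves : List (String × Int)) (out : Int) : Prop := out = compute_password_alt moves
instance (moves : List (String × Int)) (out : Int) : Decidable (Spec_compute_password moves out) := by unfold Spec_compute_password; infer_instance

-- ===== CLAIM (what is proved, stated in full; the proofs are below) =====
def Claim_equal_compute_password : Prop := ∀ (moves : List (String × Int)), Dom_compute_password moves → Spec_compute_password moves (compute_password moves)

-- ===== LEMMAS AND PROOFS =====

/-- Prefix sums of `ds` starting from running total `t` (proof-only helper). -/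
def psums (t : Int) : List Int → List Int
  | [] => []
  | d :: ds => (t + d) :: psums (t + d) ds

lemma sums_foldl (ds : List Int) : ∀ (t : Int) (l : List Int),
    (ds.foldl (fun (st : Int × List Int) d => (st.1 + d, st.2 ++ [st.1 + d])) (t, l)).2
      = l ++ psums t ds := by
  induction ds with
  | nil => intro t l; simp [psums]
  | cons d ds ih =>
      intro t l
      simp only [List.foldl_cons, psums]
      rw [ih]
      simp

lemma loopA (moves : List (String × Int)) : ∀ (t z : Int),
    (moves.foldl (fun (st : Int × Int) m =>
        let pos := if m.1 == "L" then PySem.Int.mod (st.1 - m.2) 100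
                   else PySem.Int.mod (st.1 + m.2) 100
        (pos, if pos == 0 then st.2 + 1 else st.2))
      (PySem.Int.mod (50 + t) 100, z)).2
    = z + (((psums t (moves.map (fun m => if m.1 == "L" then -m.2 else m.2))).countP
              (fun s => PySem.Int.mod (50 + s) 100 == 0) : Nat) : Int) := by
  induction moves with
  | nil => intro t z; simp [psums]
  | cons m ms ih =>
      intro t z
      have hδ : (if m.1 == "L" then PySem.Int.mod (PySem.Int.mod (50 + t) 100 - m.2) 100
                 else PySem.Int.mod (PySem.Int.mod (50 + t) 100 + m.2) 100)
          = PySem.Int.mod (50 + (t + (if m.1 == "L" then -m.2 else m.2))) 100 := by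
        simp only [PySem.Int.mod_eq_emod_of_pos (show (0:Int) < 100 by norm_num)]
        split <;> omega
      simp only [List.foldl_cons, List.map_cons, psums]
      rw [hδ, ih]
      simp only [List.countP_cons, beq_iff_eq]
      split_ifs <;> push_cast <;> ring

-- ===== VERDICT (by name: the statement is the Claim_ definition above) =====
theorem compute_password_spec : Claim_equal_compute_password := by
  intro moves _
  unfold Spec_compute_password compute_password compute_password_alt
  dsimp only
  rw [sums_foldl]
  have h50 : (50 : Int) = PySem.Int.mod (50 + 0) 100 := by decide
  rw [h50, loopA moves 0 0]
  simp
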